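-- pv_equiv track=rewrite | github.com/OnurKorkmaz1/Python-Codes | Revit/new.py | ard_topla
-- ===== SOURCE A (Python) =====
-- def ard_topla(liste):   # bu ardışık toplama işlemi için bir fonksiyon tanımlıyoruz.
--     yeni_liste = []     # işlemin kullanacağı liste yaratıyoruz
--
--     toplam = 0
--
--     for i in range(len(liste)):
--         if i == 0:
--             yeni_liste.append(liste[i])
--             toplam += liste[i]
--         else:
--             toplam += liste[i]
--             if toplam > 500:
--                 break
--             else:
--                 yeni_liste.append(liste[i])
--
--     return yeni_liste, liste[i+1:]
-- ===== SOURCE B (Python) =====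
-- def ard_topla(liste):
--     # Build the full prefix-sum table, then find the first index i >= 1
--     # whose cumulative sum exceeds 500 and split by slicing.
--     sums = []
--     t = 0
--     for x in liste:
--         t += x
--         sums.append(t)
--     cut = None
--     for i in range(1, len(sums)):
--         if sums[i] > 500:
--             cut = i
--             break
--     if cut is None:
--         return liste[:], []
--     return liste[:cut], liste[cut + 1:]
-- ===== Notes on version B (the rewrite author's own statement) =====
-- stated objective: alternative
-- what changed: Replaces the append-as-you-go loop by a two-phase plan: build the full prefix-sum table, locate the first index >= 1 whose cumulative sum exceeds 500, and produce both outputs by slicing at that index.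
import Mathlib
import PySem

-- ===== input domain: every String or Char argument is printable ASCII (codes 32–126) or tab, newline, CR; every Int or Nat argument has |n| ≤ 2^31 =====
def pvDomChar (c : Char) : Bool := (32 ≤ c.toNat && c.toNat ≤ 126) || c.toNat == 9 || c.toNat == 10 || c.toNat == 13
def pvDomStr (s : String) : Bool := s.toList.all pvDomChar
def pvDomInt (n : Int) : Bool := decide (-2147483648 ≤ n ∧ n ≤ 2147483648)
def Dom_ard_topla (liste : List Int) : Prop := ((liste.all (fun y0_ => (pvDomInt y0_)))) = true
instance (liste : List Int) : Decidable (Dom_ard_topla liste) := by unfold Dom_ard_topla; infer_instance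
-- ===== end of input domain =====

-- B re-implements A as two phases (prefix-sum table + split index + slices); return values proved equal on nonempty lists.

-- ===== PORT A =====
-- A's for-loop over range(len(liste)); state (yeni_liste, toplam); the returned Nat is the
-- final value of the loop variable i (the break index, or len-1 after a full run).
-- Index access liste[i] is always in range here, so getD transcribes it exactly.
def ardLoopA (liste : List Int) (n i : Nat) (yeni : List Int) (toplam : Int) :
    List Int × Nat :=
  if h : i < n then
    let x := liste.getD i 0
    if i = 0 then
      ardLoopA liste n (i + 1) (yeni ++ [x]) (toplam + x)
    else
      let t := toplam + x
      if t > 500 then (yeni, i)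
      else ardLoopA liste n (i + 1) (yeni ++ [x]) t
  else (yeni, i - 1)
  termination_by n - i

def ard_topla (liste : List Int) : List Int × List Int :=
  let r := ardLoopA liste liste.length 0 [] 0
  -- liste[i+1:] with a nonnegative index is List.drop (i+1)
  (r.1, liste.drop (r.2 + 1))

-- ===== PORT B =====
-- phase 1: sums.append(t) loop, as structural recursion carrying the running sum t
def buildSums : List Int → Int → List Int
  | [], _ => []
  | x :: xs, t => (t + x) :: buildSums xs (t + x)

-- phase 2: first i in range(1, len(sums)) with sums[i] > 500
def findCut (sums : List Int) (n i : Nat) : Option Nat :=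
  if _ : i < n then
    if sums.getD i 0 > 500 then some i else findCut sums n (i + 1)
  else none
  termination_by n - i

def ard_topla_alt (liste : List Int) : List Int × List Int :=
  let sums := buildSums liste 0
  match findCut sums sums.length 1 with
  | none => (liste, [])
  | some c => (liste.take c, liste.drop (c + 1))

-- ===== PRECONDITION & SPEC =====
-- Pre_ excludes only the empty list, on which A raises UnboundLocalError (i is never bound).
def Pre_ard_topla (liste : List Int) : Prop := liste ≠ []
instance (liste : List Int) : Decidable (Pre_ard_topla liste) := by unfold Pre_ard_topla; infer_instance
def pvWitness_ard_topla : List Int := [1, 2, 3]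

def Spec_ard_topla (liste : List Int) (out : List Int × List Int) : Prop := out = ard_topla_alt liste
instance (liste : List Int) (out : List Int × List Int) : Decidable (Spec_ard_topla liste out) := by unfold Spec_ard_topla; infer_instance

-- ===== CLAIM (what is proved, stated in full; the proofs are below) =====
def Claim_equal_ard_topla : Prop := ∀ (liste : List Int), Dom_ard_topla liste → Pre_ard_topla liste → Spec_ard_topla liste (ard_topla liste)

-- ===== LEMMAS AND PROOFS =====

theorem buildSums_length (l : List Int) (t : Int) : (buildSums l t).length = l.length := by
  induction l generalizing t with
  | nil => simp [buildSums]
  | cons x xs ih => simp [buildSums, ih]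

theorem buildSums_getD (l : List Int) (t : Int) (i : Nat) (h : i < l.length) :
    (buildSums l t).getD i 0 = t + (l.take (i + 1)).sum := by
  induction l generalizing t i with
  | nil => simp at h
  | cons x xs ih =>
    cases i with
    | zero => simp [buildSums]
    | succ j =>
      simp only [buildSums, List.getD_cons_succ]
      rw [ih (t + x) j (by simpa using h)]
      simp [List.take_succ_cons, add_assoc]

theorem take_append_getD (l : List Int) (i : Nat) (h : i < l.length) :
    l.take i ++ [l.getD i 0] = l.take (i + 1) := by
  rw [List.take_succ]
  simp [List.getD, List.getElem?_eq_getElem h]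

theorem take_succ_sum (l : List Int) (i : Nat) (h : i < l.length) :
    (l.take (i + 1)).sum = (l.take i).sum + l.getD i 0 := by
  rw [← take_append_getD l i h, List.sum_append]
  simp

-- the main invariant: from any i ≥ 1, A's loop agrees with B's cut search
theorem ardLoopA_eq (liste : List Int) (k : Nat) :
    ∀ i, 1 ≤ i → i ≤ liste.length → liste.length - i = k →
    ardLoopA liste liste.length i (liste.take i) ((liste.take i).sum) =
      (match findCut (buildSums liste 0) liste.length i with
       | none => (liste, liste.length - 1)
       | some c => (liste.take c, c)) := by
  induction k with
  | zero =>
    intro i h1 h2 h3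
    have hi : i = liste.length := by omega
    rw [ardLoopA, findCut]
    simp [hi, List.take_length]
  | succ k ih =>
    intro i h1 h2 h3
    have hlt : i < liste.length := by omega
    rw [ardLoopA, findCut]
    have hsum : (buildSums liste 0).getD i 0 = (liste.take (i + 1)).sum := by
      rw [buildSums_getD liste 0 i hlt]; ring_nf
    have hstep : (liste.take i).sum + liste.getD i 0 = (liste.take (i + 1)).sum :=
      (take_succ_sum liste i hlt).symm
    simp only [hlt, dif_pos]
    have hne : ¬ (i = 0) := by omega
    simp only [hne, if_neg, hsum, hstep]
    by_cases hc : (liste.take (i + 1)).sum > 500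
    · simp [hc]
    · simp only [hc, if_neg, not_false_iff]
      rw [take_append_getD liste i hlt]
      exact ih (i + 1) (by omega) (by omega) (by omega)

theorem ard_topla_eq_alt (liste : List Int) (h : liste ≠ []) :
    ard_topla liste = ard_topla_alt liste := by
  have hlen : 0 < liste.length := List.length_pos_iff.mpr h
  have h0 : ardLoopA liste liste.length 0 [] 0 =
      (match findCut (buildSums liste 0) liste.length 1 with
       | none => (liste, liste.length - 1)
       | some c => (liste.take c, c)) := by
    rw [ardLoopA]
    simp only [hlen, dif_pos, if_pos rfl]
    have h1 : ([] : List Int) ++ [liste.getD 0 0] = liste.take 1 := by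
      simpa using take_append_getD liste 0 hlen
    have h2 : (0 : Int) + liste.getD 0 0 = (liste.take 1).sum := by
      have := take_succ_sum liste 0 hlen
      simp at this ⊢
      omega
    rw [h1, h2]
    exact ardLoopA_eq liste (liste.length - 1) 1 le_rfl hlen (by omega)
  simp only [ard_topla, ard_topla_alt, buildSums_length]
  rw [h0]
  cases hf : findCut (buildSums liste 0) liste.length 1 with
  | none =>
    simp only
    have : liste.length - 1 + 1 = liste.length := by omega
    rw [this, List.drop_length]
  | some c => simp

-- ===== VERDICT (by name: the statement is the Claim_ definition above) =====
theorem ard_topla_spec : Claim_equal_ard_topla := by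
  intro liste _ hpre
  unfold Spec_ard_topla
  exact ard_topla_eq_alt liste hpre
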